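-- pv_equiv track=rewrite | github.com/bhuvanahareem/Career_Trajectory_Analysis | study_plan.py | _distribute_skills
-- ===== SOURCE A (Python) =====
-- def _distribute_skills(skills: list) -> list[list]:
--     """Return list-of-lists representing week buckets."""
--     n = len(skills)
--     if n == 0:
--         return []
--     if n == 1:
--         num_weeks = 1
--     elif n <= 4:
--         num_weeks = 2
--     elif n <= 8:
--         num_weeks = 4
--     elif n <= 15:
--         num_weeks = 5
--     else:
--         num_weeks = 6
--
--     buckets = [[] for _ in range(num_weeks)]
--     for i, skill in enumerate(skills):
--         buckets[i % num_weeks].append(skill)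
--
--     # Redistribute so no bucket exceeds 3 skills (overflow flows to next bucket)
--     max_per_week = 3
--     final = []
--     for bucket in buckets:
--         while len(bucket) > max_per_week:
--             final.append(bucket[:max_per_week])
--             bucket = bucket[max_per_week:]
--         final.append(bucket)
--
--     return [b for b in final if b]  # remove empty buckets
-- ===== SOURCE B (Python) =====
-- def _distribute_skills(skills: list) -> list[list]:
--     """Return list-of-lists representing week buckets."""
--     n = len(skills)
--     if n == 0:
--         return []
--     num_weeks = 1 if n == 1 else 2 if n <= 4 else 4 if n <= 8 else 5 if n <= 15 else 6
--     rows = [skills[k:k + num_weeks] for k in range(0, n, num_weeks)]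
--     out = []
--     for w in range(num_weeks):
--         chunk = []
--         for row in rows:
--             if w < len(row):
--                 chunk.append(row[w])
--                 if len(chunk) == 3:
--                     out.append(chunk)
--                     chunk = []
--         if chunk:
--             out.append(chunk)
--     return out
-- ===== Notes on version B (the rewrite author's own statement) =====
-- stated objective: faster
-- what changed: A fills num_weeks buckets round-robin by i % num_weeks, then a second while-loop phase repeatedly slices each oversized bucket (bucket = bucket[3:] recopies the remainder each iteration) and finally filters out empty buckets; B never computes a modulus or materialises buckets: it cuts the input into row slices of length num_weeks, reads that matrix column by column, and emits each chunk on the fly from a size-3 accumulator, so there is no redistribution phase and no empty-bucket filter.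
import Mathlib
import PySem

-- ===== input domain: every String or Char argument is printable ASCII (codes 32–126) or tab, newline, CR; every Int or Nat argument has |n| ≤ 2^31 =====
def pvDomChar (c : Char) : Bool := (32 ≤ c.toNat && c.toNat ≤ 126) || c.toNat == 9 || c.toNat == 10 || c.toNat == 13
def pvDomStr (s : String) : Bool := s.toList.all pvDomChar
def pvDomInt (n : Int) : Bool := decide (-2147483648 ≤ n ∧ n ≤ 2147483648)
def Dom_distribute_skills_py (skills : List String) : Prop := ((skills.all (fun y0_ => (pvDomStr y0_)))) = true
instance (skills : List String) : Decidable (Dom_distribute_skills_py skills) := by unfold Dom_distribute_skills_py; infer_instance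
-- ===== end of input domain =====

-- B replaces A's round-robin bucket fill + quadratic while-loop redistribution (bucket = bucket[3:]
-- recopies the remainder each iteration) + empty filter by a row-major matrix (slices of length
-- num_weeks) read column-wise with streaming chunk emission; same return value, measured faster.

-- ===== PORT A =====
-- enumerate(xs): index/value pairs (shared primitive; A's 'for i, skill in enumerate(skills)')
def pvEnum {α : Type} (xs : List α) : List (Nat × α) := (List.range xs.length).zip xs

-- A's 'while len(bucket) > max_per_week' redistribution loop (max_per_week = 3)
def pvChunkLoopA (bucket : List String) (final : List (List String)) : List (List String) :=
  if 3 < bucket.length then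
    pvChunkLoopA (PySem.List.slice bucket (some 3) none)
      (final ++ [PySem.List.slice bucket none (some 3)])
  else final ++ [bucket]
  termination_by bucket.length
  decreasing_by
    simp [PySem.List.slice_from]
    omega

def distribute_skills_py (skills : List String) : List (List String) :=
  let n := skills.length
  if n = 0 then []
  else
    let num_weeks : Int :=
      if n = 1 then 1
      else if n ≤ 4 then 2
      else if n ≤ 8 then 4
      else if n ≤ 15 then 5
      else 6
    let buckets0 : List (List String) := (PySem.List.pyRange 0 num_weeks 1).map (fun _ => [])
    let buckets := (pvEnum skills).foldl
      (fun bs p =>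
        PySem.List.pySetD bs (PySem.Int.mod (p.1 : Int) num_weeks)
          (PySem.List.pyGetD bs (PySem.Int.mod (p.1 : Int) num_weeks) [] ++ [p.2]))
      buckets0
    let final := buckets.foldl (fun f b => pvChunkLoopA b f) []
    final.filter (fun b => !b.isEmpty)

-- ===== PORT B =====
def distribute_skills_py_alt (skills : List String) : List (List String) :=
  let n := skills.length
  if n = 0 then []
  else
    let num_weeks : Int :=
      if n = 1 then 1
      else if n ≤ 4 then 2
      else if n ≤ 8 then 4
      else if n ≤ 15 then 5
      else 6
    -- rows = [skills[k:k + num_weeks] for k in range(0, n, num_weeks)]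
    let rows := (PySem.List.pyRange 0 (n : Int) num_weeks).map
      (fun k => PySem.List.slice skills (some k) (some (k + num_weeks)))
    -- for w in range(num_weeks): walk the column, emitting a chunk whenever it reaches 3
    (PySem.List.pyRange 0 num_weeks 1).foldl
      (fun out w =>
        let st := rows.foldl
          (fun st row =>
            if w < PySem.List.len row then
              let chunk := st.2 ++ [PySem.List.pyGetD row w ""]
              if chunk.length = 3 then (st.1 ++ [chunk], []) else (st.1, chunk)
            else st)
          (out, ([] : List String))
        if st.2.isEmpty then st.1 else st.1 ++ [st.2])
      []

-- ===== PRECONDITION & SPEC =====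
def Spec_distribute_skills_py (skills : List String) (out : List (List String)) : Prop := out = distribute_skills_py_alt skills
instance (skills : List String) (out : List (List String)) : Decidable (Spec_distribute_skills_py skills out) := by unfold Spec_distribute_skills_py; infer_instance

-- ===== CLAIM (what is proved, stated in full; the proofs are below) =====
def Claim_equal_distribute_skills_py : Prop := ∀ (skills : List String), Dom_distribute_skills_py skills → Spec_distribute_skills_py skills (distribute_skills_py skills)

-- ===== LEMMAS AND PROOFS =====

-- number of weeks both versions pick for n skills
def pvNW (n : Nat) : Nat :=
  if n = 1 then 1 else if n ≤ 4 then 2 else if n ≤ 8 then 4 else if n ≤ 15 then 5 else 6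

-- column w: the values whose index is ≡ w (mod nw)
def pvCol (l : List (Nat × String)) (nw w : Nat) : List String :=
  (l.filter (fun p => p.1 % nw == w)).map (·.2)

-- chunks of ≤ 3, no empty chunk
def pvChunks (l : List String) : List (List String) :=
  if l = [] then [] else l.take 3 :: pvChunks (l.drop 3)
  termination_by l.length
  decreasing_by
    simp only [List.length_drop]
    have : 0 < l.length := List.length_pos_iff.mpr (by assumption)
    omega

-- what A's while loop produces before the empty filter
def pvChunksE (b : List String) : List (List String) :=
  if 3 < b.length then b.take 3 :: pvChunksE (b.drop 3) else [b]
  termination_by b.length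
  decreasing_by simp; omega

-- the row-major matrix B builds: rows of length nw
def pvRows (nw : Nat) (l : List String) : List (List String) :=
  if nw = 0 ∨ l = [] then [] else l.take nw :: pvRows nw (l.drop nw)
  termination_by l.length
  decreasing_by
    rename_i h
    push_neg at h
    simp only [List.length_drop]
    have : 0 < l.length := List.length_pos_iff.mpr h.2
    omega

-- B's streaming chunk emitter over one column
def pvCF (l : List String) (st : List (List String) × List String) :
    List (List String) × List String :=
  match l with
  | [] => st
  | x :: t =>
      pvCF t (if (st.2 ++ [x]).length = 3 then (st.1 ++ [st.2 ++ [x]], []) else (st.1, st.2 ++ [x]))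

lemma pvNW_pos (n : Nat) : 0 < pvNW n := by
  unfold pvNW; split_ifs <;> norm_num

lemma pvNW_cast (n : Nat) :
    (if n = 1 then (1 : Int) else if n ≤ 4 then 2 else if n ≤ 8 then 4
     else if n ≤ 15 then 5 else 6) = ((pvNW n : Nat) : Int) := by
  unfold pvNW; split_ifs <;> norm_num

lemma pvCol_cons (p : Nat × String) (l : List (Nat × String)) (nw w : Nat) :
    pvCol (p :: l) nw w =
      (if p.1 % nw = w then [p.2] else []) ++ pvCol l nw w := by
  by_cases h : p.1 % nw = w <;> simp [pvCol, h]

-- A's bucket-building fold, pointwise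
lemma pvBucketFold (nw : Nat) :
    ∀ (l : List (Nat × String)) (bs : List (List String)), bs.length = nw →
    l.foldl (fun bs p =>
        PySem.List.pySetD bs (PySem.Int.mod (p.1 : Int) (nw : Int))
          (PySem.List.pyGetD bs (PySem.Int.mod (p.1 : Int) (nw : Int)) [] ++ [p.2])) bs
      = (List.range nw).map (fun w => bs.getD w [] ++ pvCol l nw w) := by
  intro l
  induction l with
  | nil =>
      intro bs hb
      simp only [List.foldl_nil, pvCol, List.filter_nil, List.map_nil, List.append_nil]
      apply List.ext_getElem
      · simp [hb]
      · intro i hi1 hi2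
        simp only [List.getElem_map, List.getElem_range]
        rw [List.getD_eq_getElem?_getD, List.getElem?_eq_getElem (by simp at hi2; omega)]
        rfl
  | cons p l ih =>
      intro bs hb
      rw [List.foldl_cons]
      have hmod : PySem.Int.mod ((p.1 : Nat) : Int) ((nw : Nat) : Int) = ((p.1 % nw : Nat) : Int) :=
        PySem.Int.mod_natCast _ _
      have hstep :
          (PySem.List.pySetD bs (PySem.Int.mod (p.1 : Int) (nw : Int))
            (PySem.List.pyGetD bs (PySem.Int.mod (p.1 : Int) (nw : Int)) [] ++ [p.2]))
          = bs.set (p.1 % nw) (bs.getD (p.1 % nw) [] ++ [p.2]) := by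
        rw [hmod, PySem.List.pySetD_natCast, PySem.List.pyGetD_natCast]
      rw [hstep, ih _ (by simp [hb])]
      apply List.map_congr_left
      intro w hw
      have hwlt : w < nw := List.mem_range.mp hw
      have hnwpos : 0 < nw := by omega
      rw [pvCol_cons]
      by_cases hc : p.1 % nw = w
      · subst hc
        rw [List.getD_eq_getElem?_getD, List.getElem?_set]
        simp [hb, Nat.mod_lt p.1 hnwpos, List.getD_eq_getElem?_getD]
      · rw [List.getD_eq_getElem?_getD, List.getElem?_set]
        simp [List.getD_eq_getElem?_getD, hc]

-- A's while loop appends its chunks to the accumulator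
lemma pvChunkLoopA_eq (b : List String) (f : List (List String)) :
    pvChunkLoopA b f = f ++ pvChunksE b := by
  induction hL : b.length using Nat.strong_induction_on generalizing b f with
  | _ L ih =>
      subst hL
      rw [pvChunkLoopA.eq_def, pvChunksE.eq_def]
      by_cases h : 3 < b.length
      · simp only [h, if_true]
        have h1 : PySem.List.slice b (some 3) none = b.drop 3 := by
          simp [PySem.List.slice_from]
        have h2 : PySem.List.slice b none (some 3) = b.take 3 := by
          simp [PySem.List.slice_to]
        rw [h1, h2, ih (b.drop 3).length (by simp; omega) _ _ rfl]
        simp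
      · simp [h]

lemma pvChunksE_filter (b : List String) :
    (pvChunksE b).filter (fun c => !c.isEmpty) = pvChunks b := by
  induction hL : b.length using Nat.strong_induction_on generalizing b with
  | _ L ih =>
      subst hL
      rw [pvChunksE.eq_def, pvChunks.eq_def]
      by_cases h3 : 3 < b.length
      · have hb : b ≠ [] := by intro h; subst h; simp at h3
        have ht : (!(b.take 3).isEmpty) = true := by
          simp [List.take_eq_nil_iff, hb]
        simp only [h3, if_true, if_neg hb, List.filter_cons, ht]
        rw [ih (b.drop 3).length (by simp; omega) _ rfl]
      · by_cases hb : b = []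
        · subst hb; simp
        · have hd : b.drop 3 = [] := by
            rw [List.drop_eq_nil_iff]
            omega
          have ht : (!b.isEmpty) = true := by simp [hb]
          have hc0 : pvChunks ([] : List String) = [] := by rw [pvChunks.eq_def]; simp
          have htk : b.take 3 = b := List.take_of_length_le (by omega)
          simp [h3, hb, ht, hd, hc0, htk]

-- every element of A's initial bucket list is []
lemma pvGetDConstNil (l : List Int) (w : Nat) :
    (l.map (fun _ => ([] : List String))).getD w [] = [] := by
  rw [List.getD_eq_getElem?_getD]
  cases hx : (l.map (fun _ => ([] : List String)))[w]? with
  | none => rfl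
  | some v =>
      have hv := List.mem_of_getElem? hx
      simp only [List.mem_map] at hv
      obtain ⟨_, _, rfl⟩ := hv
      rfl

-- enumerate of a cons, with shifted indices
lemma pvEnum_cons (x : String) (a : List String) :
    pvEnum (x :: a) = (0, x) :: (pvEnum a).map (fun p => (p.1 + 1, p.2)) := by
  unfold pvEnum
  rw [List.length_cons, List.range_succ_eq_map, List.zip_cons_cons, List.zip_map_left]
  congr 1

-- enumerate of an append, with shifted indices on the right part
lemma pvEnum_append (a b : List String) :
    pvEnum (a ++ b) = pvEnum a ++ (pvEnum b).map (fun p => (p.1 + a.length, p.2)) := by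
  unfold pvEnum
  rw [List.length_append, List.range_add, List.zip_append (by simp), List.zip_map_left]
  congr 1
  apply List.map_congr_left
  intro p _
  simp [Prod.map, Nat.add_comm]

lemma pvCol_append (u v : List (Nat × String)) (nw w : Nat) :
    pvCol (u ++ v) nw w = pvCol u nw w ++ pvCol v nw w := by
  simp [pvCol]

-- shifting every index by nw does not change a column
lemma pvCol_shift (l : List (Nat × String)) (nw w : Nat) :
    pvCol (l.map (fun p => (p.1 + nw, p.2))) nw w = pvCol l nw w := by
  unfold pvCol
  rw [List.filter_map, List.map_map]
  congr 1
  apply List.filter_congr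
  intro p _
  simp [Nat.add_mod_right]

-- a short list's column is just its w-th element (if any)
lemma pvCol_small (a : List String) :
    ∀ (s w nw : Nat), s + a.length ≤ nw →
    pvCol ((pvEnum a).map (fun p => (p.1 + s, p.2))) nw w
      = (if s ≤ w then a[w - s]? else none).toList := by
  induction a with
  | nil =>
      intro s w nw _
      simp [pvEnum, pvCol]
  | cons x a ih =>
      intro s w nw hle
      have hs : s < nw := by simp at hle; omega
      rw [pvEnum_cons]
      simp only [List.map_cons, List.map_map, Nat.zero_add]
      rw [pvCol_cons]
      have hmod : s % nw = s := Nat.mod_eq_of_lt hs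
      have hcomp : ((fun (p : Nat × String) => (p.1 + s, p.2)) ∘ fun (p : Nat × String) => (p.1 + 1, p.2))
          = (fun (p : Nat × String) => (p.1 + (s + 1), p.2)) := by
        funext p
        simp [Function.comp]
        omega
      rw [hcomp, ih (s + 1) w nw (by simp at hle ⊢; omega)]
      simp only [hmod]
      by_cases hw : s = w
      · subst hw
        have hf : ¬ (s + 1 ≤ s) := by omega
        simp [hf]
      · by_cases hw2 : s + 1 ≤ w
        · have h2 : s ≤ w := by omega
          have hsub : w - s = (w - (s + 1)) + 1 := by omega
          simp [hw, hw2, h2, hsub]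
        · have h2 : ¬ (s ≤ w) := by omega
          simp [hw, hw2, h2]

-- the column of the row matrix is pvCol
lemma pvColGather (nw w : Nat) (hnw : 0 < nw) :
    ∀ (xs : List String),
    (pvRows nw xs).filterMap (fun row => row[w]?) = pvCol (pvEnum xs) nw w := by
  intro xs
  induction hL : xs.length using Nat.strong_induction_on generalizing xs with
  | _ L ih =>
      subst hL
      by_cases hx : xs = []
      · subst hx
        simp [pvRows, pvEnum, pvCol]
      · rw [pvRows.eq_def, if_neg (by push_neg; exact ⟨by omega, hx⟩)]
        rw [List.filterMap_cons]
        have hsplit : pvCol (pvEnum xs) nw w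
            = pvCol (pvEnum (xs.take nw)) nw w ++ pvCol (pvEnum (xs.drop nw)) nw w := by
          conv_lhs => rw [← List.take_append_drop nw xs]
          rw [pvEnum_append, pvCol_append]
          congr 1
          by_cases hn : xs.length ≤ nw
          · have hd : xs.drop nw = [] := by simp [List.drop_eq_nil_iff]; omega
            simp [hd, pvEnum, pvCol]
          · have hl : (xs.take nw).length = nw := by simp; omega
            rw [hl, pvCol_shift]
        rw [hsplit]
        have hcolsmall : pvCol (pvEnum (xs.take nw)) nw w = ((xs.take nw)[w]?).toList := by
          have h0 : (pvEnum (xs.take nw)).map (fun (p : Nat × String) => (p.1 + 0, p.2))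
              = pvEnum (xs.take nw) := by
            simp
          rw [← h0, pvCol_small (xs.take nw) 0 w nw (by simp)]
          simp
        have hrest := ih (xs.drop nw).length
          (by simp; have : 0 < xs.length := List.length_pos_iff.mpr hx; omega) (xs.drop nw) rfl
        rw [hrest] at *
        cases hg : (xs.take nw)[w]? with
        | none => simp [hcolsmall, hg]
        | some v => simp [hcolsmall, hg]

-- the guarded fold over rows is the chunk emitter over the gathered column
lemma pvFoldGuard (w : Nat) :
    ∀ (rows : List (List String)) (st : List (List String) × List String),
    rows.foldl
      (fun st row =>
        if w < row.length then
          if (st.2 ++ [row.getD w ""]).length = 3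
            then (st.1 ++ [st.2 ++ [row.getD w ""]], ([] : List String))
            else (st.1, st.2 ++ [row.getD w ""])
        else st) st
      = pvCF (rows.filterMap (fun row => row[w]?)) st := by
  intro rows
  induction rows with
  | nil => intro st; simp [pvCF]
  | cons row rows ih =>
      intro st
      rw [List.foldl_cons, List.filterMap_cons]
      by_cases h : w < row.length
      · have hg : row[w]? = some row[w] := List.getElem?_eq_getElem h
        have hd : row.getD w "" = row[w] := by
          rw [List.getD_eq_getElem?_getD, hg]; rfl
        rw [hg]
        simp only [pvCF, h, if_pos, hd]
        exact ih _
      · have hg : row[w]? = none := List.getElem?_eq_none (by omega)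
        rw [hg]
        simp only [if_neg h]
        exact ih st

-- the chunk emitter produces exactly the 3-chunks of the column
lemma pvCF_correct :
    ∀ (l : List String) (out : List (List String)) (c : List String), c.length < 3 →
    (if (pvCF l (out, c)).2.isEmpty then (pvCF l (out, c)).1
     else (pvCF l (out, c)).1 ++ [(pvCF l (out, c)).2])
      = out ++ pvChunks (c ++ l) := by
  intro l
  induction l with
  | nil =>
      intro out c hc
      by_cases h : c = []
      · subst h
        simp [pvCF, pvChunks]
      · have h1 : pvChunks c = [c] := by
          rw [pvChunks.eq_def, if_neg h, List.take_of_length_le (by omega)]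
          rw [pvChunks.eq_def]
          simp [List.drop_eq_nil_iff]
          omega
        simp [pvCF, h, h1]
  | cons x t ih =>
      intro out c hc
      simp only [pvCF]
      by_cases h3 : (c ++ [x]).length = 3
      · rw [if_pos h3, ih _ [] (by simp)]
        have hch : pvChunks (c ++ x :: t) = (c ++ [x]) :: pvChunks t := by
          rw [pvChunks.eq_def, if_neg (by simp)]
          have he : c ++ x :: t = (c ++ [x]) ++ t := by simp
          rw [he]
          congr 1
          · rw [← h3, List.take_left]
          · rw [← h3, List.drop_left]
        rw [hch]
        simp
      · rw [if_neg h3, ih _ (c ++ [x]) (by simp at h3 ⊢; omega)]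
        have he : (c ++ [x]) ++ t = c ++ x :: t := by simp
        rw [he]

-- ceiling-division recurrence used to peel one row
lemma pvCeilStep (L nw : Nat) (hL : 0 < L) (hnw : 0 < nw) :
    (L + nw - 1) / nw = ((L - nw) + nw - 1) / nw + 1 := by
  by_cases h : L ≤ nw
  · have h1 : L + nw - 1 = (L - 1) + nw := by omega
    have h2 : L - nw = 0 := by omega
    rw [h1, Nat.add_div_right _ hnw, Nat.div_eq_of_lt (by omega), h2]
    rw [Nat.div_eq_of_lt (by omega)]
  · have h1 : L + nw - 1 = (L - 1) + nw := by omega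
    have h2 : (L - nw) + nw - 1 = (L - nw - 1) + nw := by omega
    have h3 : L - 1 = (L - nw - 1) + nw := by omega
    rw [h1, Nat.add_div_right _ hnw, h2, Nat.add_div_right _ hnw, h3, Nat.add_div_right _ hnw]

-- the range comprehension builds exactly the rows
lemma pvRowsRange (nw : Nat) (hnw : 0 < nw) :
    ∀ (l : List String),
    (List.range ((l.length + nw - 1) / nw)).map (fun k => (l.drop (nw * k)).take nw)
      = pvRows nw l := by
  intro l
  induction hL : l.length using Nat.strong_induction_on generalizing l with
  | _ L ih =>
      subst hL
      by_cases hc : l = []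
      · subst hc
        have hz : ((([] : List String).length + nw - 1) / nw) = 0 := by
          apply Nat.div_eq_of_lt
          simp
          omega
        have hr : pvRows nw ([] : List String) = [] := by
          rw [pvRows.eq_def]
          simp
        simp [hr]
        omega
      · have hpos : 0 < l.length := List.length_pos_iff.mpr hc
        have hm : (l.length + nw - 1) / nw = ((l.drop nw).length + nw - 1) / nw + 1 := by
          rw [List.length_drop]
          exact pvCeilStep l.length nw hpos hnw
        rw [pvRows.eq_def, if_neg (by push_neg; exact ⟨by omega, hc⟩), hm,
            List.range_succ_eq_map]
        simp only [List.map_cons, List.map_map, Nat.mul_zero, List.drop_zero]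
        refine congrArg₂ List.cons rfl ?_
        have hfun : ((fun k => (l.drop (nw * k)).take nw) ∘ Nat.succ)
            = (fun k => ((l.drop nw).drop (nw * k)).take nw) := by
          funext k
          simp only [Function.comp_apply, List.drop_drop]
          congr 2
          rw [Nat.mul_succ, Nat.add_comm]
        have hih := ih (l.drop nw).length (by simp; omega) (l.drop nw) rfl
        simp only [List.length_drop] at hih ⊢
        rw [hfun]
        exact hih

-- one week of B's outer loop: gather the column, emit its 3-chunks after out
lemma pvWeek (nw : Nat) (hnw : 0 < nw) (w : Nat) (xs : List String)
    (out : List (List String)) :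
    (let st := (pvRows nw xs).foldl
        (fun st row =>
          if (w : Int) < PySem.List.len row then
            let chunk := st.2 ++ [PySem.List.pyGetD row (w : Int) ""]
            if chunk.length = 3 then (st.1 ++ [chunk], []) else (st.1, chunk)
          else st)
        (out, ([] : List String))
      if st.2.isEmpty then st.1 else st.1 ++ [st.2])
      = out ++ pvChunks (pvCol (pvEnum xs) nw w) := by
  simp only [PySem.List.len_eq, PySem.List.pyGetD_natCast, Nat.cast_lt]
  rw [pvFoldGuard w (pvRows nw xs) (out, []), pvColGather nw w hnw xs]
  have h := pvCF_correct (pvCol (pvEnum xs) nw w) out [] (by simp)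
  simpa using h

-- B's result in canonical form
lemma pvB_canon (xs : List String) (h0 : xs.length ≠ 0) :
    distribute_skills_py_alt xs
      = (List.range (pvNW xs.length)).flatMap
          (fun w => pvChunks (pvCol (pvEnum xs) (pvNW xs.length) w)) := by
  unfold distribute_skills_py_alt
  simp only [if_neg h0, pvNW_cast]
  set nw := pvNW xs.length with hnw
  have hnwpos : 0 < nw := pvNW_pos _
  -- the row comprehension is pvRows
  have hrows : (PySem.List.pyRange 0 (xs.length : Int) ((nw : Nat) : Int)).map
      (fun k => PySem.List.slice xs (some k) (some (k + ((nw : Nat) : Int)))) = pvRows nw xs := by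
    rw [PySem.List.pyRange_of_pos 0 (xs.length : Int) (by exact_mod_cast hnwpos)]
    have hcnt : (if (0 : Int) < (xs.length : Int) then
          (((xs.length : Int) - 0 + ((nw : Nat) : Int) - 1) / ((nw : Nat) : Int)).toNat else 0)
        = (xs.length + nw - 1) / nw := by
      rw [if_pos (by exact_mod_cast Nat.pos_of_ne_zero h0)]
      have h1 : ((xs.length : Int) - 0 + ((nw : Nat) : Int) - 1)
          = ((xs.length + nw - 1 : Nat) : Int) := by omega
      rw [h1, ← Int.natCast_div, Int.toNat_natCast]
    rw [hcnt, List.map_map, ← pvRowsRange nw hnwpos xs]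
    apply List.map_congr_left
    intro k _
    have h1 : ((0 : Int) + ((nw : Nat) : Int) * (k : Int)) = ((nw * k : Nat) : Int) := by
      push_cast; ring
    have h2 : (((nw * k : Nat) : Int) + ((nw : Nat) : Int))
        = ((nw * k + nw : Nat) : Int) := by push_cast; ring
    simp only [Function.comp_apply]
    rw [h1, h2, PySem.List.slice_natCast]
    congr 1
    simp
  rw [hrows, PySem.List.pyRange_one 0 ((nw : Nat) : Int)]
  have htn : (((nw : Nat) : Int) - 0).toNat = nw := by omega
  rw [htn, List.foldl_map]
  rw [List.foldl_ext _ (fun out (k : Nat) => out ++ pvChunks (pvCol (pvEnum xs) nw k)) []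
      (by
        intro out k _
        have h0k : ((0 : Int) + (k : Int)) = ((k : Nat) : Int) := by omega
        rw [h0k]
        exact pvWeek nw hnwpos k xs out)]
  rw [PySem.List.foldl_append_eq_flatMap, List.nil_append]

-- A's result in canonical form
lemma pvA_canon (xs : List String) (h0 : xs.length ≠ 0) :
    distribute_skills_py xs
      = (List.range (pvNW xs.length)).flatMap
          (fun w => pvChunks (pvCol (pvEnum xs) (pvNW xs.length) w)) := by
  unfold distribute_skills_py
  simp only [if_neg h0, pvNW_cast]
  set nw := pvNW xs.length with hnw
  have hlen : ((PySem.List.pyRange 0 ((nw : Nat) : Int) 1).map (fun _ => ([] : List String))).length = nw := by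
    simp [PySem.List.length_pyRange_one]
  rw [pvBucketFold nw (pvEnum xs) _ hlen]
  have hmapnil : (List.range nw).map
        (fun w => ((PySem.List.pyRange 0 ((nw : Nat) : Int) 1).map (fun _ => ([] : List String))).getD w []
          ++ pvCol (pvEnum xs) nw w)
      = (List.range nw).map (fun w => pvCol (pvEnum xs) nw w) := by
    apply List.map_congr_left
    intro w _
    rw [pvGetDConstNil, List.nil_append]
  rw [hmapnil]
  have hfn : (fun (f : List (List String)) b => pvChunkLoopA b f) = (fun f b => f ++ pvChunksE b) :=
    funext fun f => funext fun b => pvChunkLoopA_eq b f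
  rw [hfn, PySem.List.foldl_append_eq_flatMap, List.nil_append, List.filter_flatMap,
      List.flatMap_map]
  simp only [pvChunksE_filter]

-- ===== VERDICT (by name: the statement is the Claim_ definition above) =====
theorem distribute_skills_py_spec : Claim_equal_distribute_skills_py := by
  intro xs _
  unfold Spec_distribute_skills_py
  by_cases h0 : xs.length = 0
  · have hnil : xs = [] := List.eq_nil_of_length_eq_zero h0
    subst hnil
    rfl
  · rw [pvA_canon xs h0, pvB_canon xs h0]
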